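-- pv_equiv track=rewrite | github.com/NathanZK/Competitive-Programming | Programmers and Mathematicians.py | search
-- ===== SOURCE A (Python) =====
-- def search(a, b):
--    min_ = min(a, b)
--    maxTeams = (a+b)//4
--    left, right = 0, maxTeams
--
--    while left <= right:
--       mid = (left+right)//2
--       if mid > min_:
--          right = mid - 1
--       elif mid < min_:
--          left = mid + 1
--       else:
--          return mid
--
--    return maxTeams
-- ===== SOURCE B (Python) =====
-- def search(a, b):
--    min_ = min(a, b)
--    maxTeams = (a + b) // 4
--    return min_ if 0 <= min_ <= maxTeams else maxTeams
-- ===== Notes on version B (the rewrite author's own statement) =====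
-- stated objective: simpler
-- what changed: Replaces the binary-search loop over [0, maxTeams] with a closed-form conditional: return min(a,b) when it lies in [0, (a+b)//4], else (a+b)//4.
import Mathlib
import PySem

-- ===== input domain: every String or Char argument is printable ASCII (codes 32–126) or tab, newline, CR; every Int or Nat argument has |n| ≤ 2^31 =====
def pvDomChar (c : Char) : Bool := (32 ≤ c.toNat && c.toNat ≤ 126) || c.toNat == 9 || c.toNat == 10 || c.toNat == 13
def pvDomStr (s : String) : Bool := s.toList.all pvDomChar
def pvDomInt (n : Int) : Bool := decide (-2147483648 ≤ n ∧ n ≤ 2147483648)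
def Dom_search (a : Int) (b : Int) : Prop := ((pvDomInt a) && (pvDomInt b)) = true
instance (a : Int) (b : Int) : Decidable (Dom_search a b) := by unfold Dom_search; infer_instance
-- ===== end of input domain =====

-- B replaces A's binary-search loop with a closed-form conditional (simpler, same value).


-- ===== PORT A =====
-- the while loop: returns mid (= min_) if found, else none (loop exits)
def searchLoop (min_ : Int) (left right : Int) : Option Int :=
  if h : left ≤ right then
    let mid := PySem.Int.floordiv (left + right) 2
    if mid > min_ then searchLoop min_ left (mid - 1)
    else if mid < min_ then searchLoop min_ (mid + 1) right
    else some mid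
  else none
termination_by (right + 1 - left).toNat
decreasing_by
  · have := PySem.Int.floordiv_two_mid_bounds h
    omega
  · have := PySem.Int.floordiv_two_mid_bounds h
    omega

def search (a : Int) (b : Int) : Int :=
  let min_ := min a b
  let maxTeams := PySem.Int.floordiv (a + b) 4
  match searchLoop min_ 0 maxTeams with
  | some m => m
  | none => maxTeams

-- ===== PORT B =====
def search_alt (a : Int) (b : Int) : Int :=
  let min_ := min a b
  let maxTeams := PySem.Int.floordiv (a + b) 4
  if 0 ≤ min_ ∧ min_ ≤ maxTeams then min_ else maxTeams

-- ===== PRECONDITION & SPEC =====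
def Spec_search (a : Int) (b : Int) (out : Int) : Prop := out = search_alt a b
instance (a : Int) (b : Int) (out : Int) : Decidable (Spec_search a b out) := by unfold Spec_search; infer_instance

-- ===== CLAIM (what is proved, stated in full; the proofs are below) =====
def Claim_equal_search : Prop := ∀ (a : Int) (b : Int), Dom_search a b → Spec_search a b (search a b)

-- ===== LEMMAS AND PROOFS =====
-- invariant: the loop finds min_ iff left ≤ min_ ≤ right
theorem searchLoop_eq (min_ : Int) : ∀ (left right : Int),
    searchLoop min_ left right = if left ≤ min_ ∧ min_ ≤ right then some min_ else none := by
  intro left right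
  induction left, right using searchLoop.induct min_ with
  | case1 left right h mid hgt ih =>
    rw [searchLoop]
    have := PySem.Int.floordiv_two_mid_bounds h
    simp only [h, dite_true]
    rw [if_pos hgt, ih]
    split_ifs <;> first | rfl | (exfalso; omega)
  | case2 left right h mid hgt hlt ih =>
    rw [searchLoop]
    have := PySem.Int.floordiv_two_mid_bounds h
    simp only [h, dite_true]
    rw [if_neg hgt, if_pos hlt, ih]
    split_ifs <;> first | rfl | (exfalso; omega)
  | case3 left right h mid hgt hlt =>
    rw [searchLoop]
    have := PySem.Int.floordiv_two_mid_bounds h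
    simp only [h, dite_true]
    rw [if_neg hgt, if_neg hlt, if_pos (show left ≤ min_ ∧ min_ ≤ right by omega)]
    exact congrArg some (by omega)
  | case4 left right h =>
    rw [searchLoop, dif_neg h, if_neg (show ¬(left ≤ min_ ∧ min_ ≤ right) by omega)]

-- ===== VERDICT (by name: the statement is the Claim_ definition above) =====
theorem search_spec : Claim_equal_search := by
  intro a b _
  unfold Spec_search search search_alt
  simp only [searchLoop_eq]
  split_ifs <;> rfl
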